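-- pv_equiv track=rewrite | github.com/VitamintK/AlgorithmProblems | leetcode/c204/c.py | dfs
-- ===== SOURCE A (Python) =====
-- def dfs(grid, delete):
--     g = [[x for x in r] for r in grid]
--     if delete is not None:
--         r, c = delete
--         g[r][c] = 0
--     o = 0
--     for i in range(len(g)):
--         for j in range(len(g[i])):
--             if g[i][j]:
--                 o += 1
--                 dfs2(g, i,j)
--     return o != 1
--
-- def dfs2(g, r, c):
--     for dr, dc in [(-1, 0), (1,0), (0,1), (0,-1)]:
--         nr, nc = r+dr, c+dc
--         if nr < 0 or nr >= len(g) or nc < 0 or nc >= len(g[0]):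
--             continue
--         if g[nr][nc] == 1:
--             g[nr][nc] = 0
--             dfs2(g, nr, nc)
-- ===== SOURCE B (Python) =====
-- def dfs(grid, delete):
--     g = [list(r) for r in grid]
--     if delete is not None:
--         r, c = delete
--         g[r][c] = 0
--     cells = [(i, j) for i, row in enumerate(g) for j in range(len(row))]
--     o = 0
--     for i, j in cells:
--         if g[i][j]:
--             o += 1
--             stack = [(i, j, 0)]
--             while stack:
--                 r, c, k = stack.pop()
--                 if k >= 4:
--                     continue
--                 stack.append((r, c, k + 1))
--                 nr = r + (-1, 1, 0, 0)[k]
--                 nc = c + (0, 0, 1, -1)[k]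
--                 if 0 <= nr < len(g) and 0 <= nc < len(g[0]) and g[nr][nc] == 1:
--                     g[nr][nc] = 0
--                     stack.append((nr, nc, 0))
--     return o != 1
-- ===== Notes on version B (the rewrite author's own statement) =====
-- stated objective: alternative
-- what changed: the nested index loops are replaced by one pass over a precomputed flattened cell list, and the recursive dfs2 flood fill is replaced by an iterative loop driven by an explicit stack of (row, col, next-direction-index) frames with a single combined in-bounds-and-equals-1 test; copy, delete handling and the final 'o != 1' are kept
import Mathlib
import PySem

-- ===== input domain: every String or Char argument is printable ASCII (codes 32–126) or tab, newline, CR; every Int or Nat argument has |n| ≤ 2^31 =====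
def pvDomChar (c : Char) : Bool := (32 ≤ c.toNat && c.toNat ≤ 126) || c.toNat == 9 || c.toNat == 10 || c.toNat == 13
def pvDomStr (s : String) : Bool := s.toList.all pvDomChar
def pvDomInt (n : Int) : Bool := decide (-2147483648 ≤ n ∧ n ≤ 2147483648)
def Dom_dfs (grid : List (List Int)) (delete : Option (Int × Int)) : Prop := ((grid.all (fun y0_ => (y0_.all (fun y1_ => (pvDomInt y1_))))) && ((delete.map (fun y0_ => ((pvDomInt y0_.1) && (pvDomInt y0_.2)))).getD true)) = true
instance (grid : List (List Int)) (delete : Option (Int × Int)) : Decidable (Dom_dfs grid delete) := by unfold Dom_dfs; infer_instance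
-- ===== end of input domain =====

-- B flattens the two index loops into one pass over a precomputed cell list and replaces
-- the recursive dfs2 flood fill by an iterative one driven by an explicit stack of
-- (row, col, next-direction-index) frames; copy/delete handling and the final `o != 1`
-- are unchanged (objective: alternative decomposition).
-- Neither Python mutates its arguments (both work on a copy of `grid`).

-- ===== PORT A =====
-- the direction table [(-1,0),(1,0),(0,1),(0,-1)]
def pvDirs : List (Int × Int) := [(-1, 0), (1, 0), (0, 1), (0, -1)]
-- read g[r][c], 0 when the access would raise (only reached out of Pre_ or after the bound checks)
def pvRead (g : List (List Int)) (r c : Int) : Int :=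
  ((PySem.List.pyGet? g r).bind (fun row => PySem.List.pyGet? row c)).getD 0
-- g[r][c] = 0
def pvSet0 (g : List (List Int)) (r c : Int) : List (List Int) :=
  PySem.List.pySetD g r (PySem.List.pySetD (PySem.List.pyGetD g r []) c 0)
-- `nr < 0 or nr >= len(g) or nc < 0 or nc >= len(g[0])` (the `continue` test)
def pvOob (g : List (List Int)) (nr nc : Int) : Bool :=
  decide (nr < 0) || decide ((g.length : Int) ≤ nr) || decide (nc < 0) ||
    decide (((PySem.List.pyGetD g 0 []).length : Int) ≤ nc)
-- the copy `[[x for x in r] for r in grid]` followed by `if delete is not None: g[r][c] = 0`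
def pvDelete (g : List (List Int)) (delete : Option (Int × Int)) : List (List Int) :=
  match delete with
  | none => g
  | some (r, c) => pvSet0 g r c
-- number of cells equal to 1 (fuel bound for A's recursion)
def pvOnes (g : List (List Int)) : Nat :=
  (g.map (fun row => row.countP (fun x => x == 1))).sum

-- dfs2(g, r, c): the fuel argument only makes the structural recursion total; with the
-- fuel dfs2A supplies it is never exhausted (this is part of what the main lemma proves).
def pvGoA : Nat → List (List Int) → Int → Int → List (Int × Int) → List (List Int)
  | _, g, _, _, [] => g
  | 0, g, _, _, _ :: _ => g
  | f + 1, g, r, c, (dr, dc) :: ds =>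
      let nr := r + dr
      let nc := c + dc
      if pvOob g nr nc then pvGoA f g r c ds
      else if pvRead g nr nc == 1 then
        pvGoA f (pvGoA f (pvSet0 g nr nc) nr nc pvDirs) r c ds
      else pvGoA f g r c ds

def pvDfs2A (g : List (List Int)) (r c : Int) : List (List Int) :=
  pvGoA (5 * pvOnes g + 10) g r c pvDirs

def dfs (grid : List (List Int)) (delete : Option (Int × Int)) : Bool :=
  let g0 := pvDelete grid delete
  let res :=
    (PySem.List.pyRange 0 g0.length 1).foldl (fun (s : List (List Int) × Int) i =>
      (PySem.List.pyRange 0 (PySem.List.pyGetD s.1 i []).length 1).foldl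
        (fun (s2 : List (List Int) × Int) j =>
          if pvRead s2.1 i j ≠ 0 then (pvDfs2A s2.1 i j, s2.2 + 1) else s2) s)
      (g0, 0)
  decide (res.2 ≠ 1)

-- ===== PORT B =====
-- Source B's two direction tuples `(-1, 1, 0, 0)` and `(0, 0, 1, -1)`
def pvDR : List Int := [-1, 1, 0, 0]
def pvDC : List Int := [0, 0, 1, -1]
-- Source B's combined test `0 <= nr < len(g) and 0 <= nc < len(g[0])`
def pvInb (g : List (List Int)) (nr nc : Int) : Bool :=
  decide (0 ≤ nr) && decide (nr < (g.length : Int)) && decide (0 ≤ nc) &&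
    decide (nc < ((PySem.List.pyGetD g 0 []).length : Int))
-- Source B's `cells = [(i, j) for i, row in enumerate(g) for j in range(len(row))]`
def pvCellsB (g : List (List Int)) : List (Int × Int) :=
  (PySem.List.enumerate g 0).flatMap
    (fun p => (PySem.List.pyRange 0 p.2.length 1).map (fun j => (p.1, j)))
-- Source B's while-loop over an explicit stack of frames (r, c, k) = cell (r, c) with
-- directions k, k+1, … still to examine.  The fuel argument only makes the loop total
-- (the loop measure 5*ones + stack weight strictly decreases each iteration, so the
-- fuel the scan supplies is never exhausted; the lemmas below prove fuel irrelevance).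
def pvFrameGoB : Nat → List (List Int) → List (Int × Int × Nat) → List (List Int)
  | _, g, [] => g
  | 0, g, _ :: _ => g
  | f + 1, g, (r, c, k) :: rest =>
      if 4 ≤ k then pvFrameGoB f g rest
      else
        let nr := r + pvDR.getD k 0
        let nc := c + pvDC.getD k 0
        if pvInb g nr nc && (pvRead g nr nc == 1) then
          pvFrameGoB f (pvSet0 g nr nc) ((nr, nc, 0) :: (r, c, k + 1) :: rest)
        else pvFrameGoB f g ((r, c, k + 1) :: rest)
-- Source B's `for i, j in cells:` loop carrying the grid and the counter
def pvScanB : List (Int × Int) → List (List Int) → Int → List (List Int) × Int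
  | [], g, o => (g, o)
  | p :: rest, g, o =>
      if pvRead g p.1 p.2 ≠ 0 then
        pvScanB rest (pvFrameGoB (5 * pvOnes g + 6) g [(p.1, p.2, 0)]) (o + 1)
      else pvScanB rest g o

def dfs_alt (grid : List (List Int)) (delete : Option (Int × Int)) : Bool :=
  let g0 := pvDelete grid delete
  decide ((pvScanB (pvCellsB g0) g0 0).2 ≠ 1)

-- ===== PRECONDITION & SPEC =====
-- Pre_ excludes exactly the inputs where the Python raises IndexError: a `delete` index
-- pair out of (negative-wrap) range, and ragged grids on which the flood fill reads a
-- position missing from a row shorter than row 0 (which happens iff such a missing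
-- position has a 4-neighbour that is non-zero after the deletion).
-- the delete indices (negative = from the end) are in range, as Python requires of g[r][c] = 0
def pvDelOk (g : List (List Int)) (delete : Option (Int × Int)) : Bool :=
  match delete with
  | none => true
  | some (r, c) =>
      decide (PySem.Raise.InRange g.length r) &&
      decide (PySem.Raise.InRange
        (g.getD (if r < 0 then ((g.length : Int) + r).toNat else r.toNat) []).length c)
def pvVal (g : List (List Int)) (i j : Nat) : Int := (g.getD i []).getD j 0
-- the position the deletion hits, with Python's negative-index wrap
def pvDelPos (g : List (List Int)) (delete : Option (Int × Int)) : Option (Nat × Nat) :=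
  match delete with
  | none => none
  | some (r, c) =>
      let i := if r < 0 then ((g.length : Int) + r).toNat else r.toNat
      let j := if c < 0 then (((g.getD i []).length : Int) + c).toNat else c.toNat
      some (i, j)
-- cell (qi, qj), if it exists, is zero after the deletion (so the flood never processes it)
def pvQuiet (g : List (List Int)) (delete : Option (Int × Int)) (qi qj : Nat) : Bool :=
  !(decide (qi < g.length) && decide (qj < (g.getD qi []).length)) ||
    (decide (pvVal g qi qj = 0) || decide (pvDelPos g delete = some (qi, qj)))
-- every position missing from a row shorter than row 0 has only zero 4-neighbours,
-- so the flood fill never reads it (= never raises IndexError)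
def pvMissingOk (grid : List (List Int)) (delete : Option (Int × Int)) : Bool :=
  (List.range grid.length).all fun i =>
    (List.range (grid.headD []).length).all fun j =>
      if (grid.getD i []).length ≤ j then
        (decide (i = 0) || pvQuiet grid delete (i - 1) j) &&
        pvQuiet grid delete (i + 1) j &&
        (decide (j = 0) || pvQuiet grid delete i (j - 1)) &&
        pvQuiet grid delete i (j + 1)
      else true
def Pre_dfs (grid : List (List Int)) (delete : Option (Int × Int)) : Prop :=
  pvDelOk grid delete = true ∧ pvMissingOk grid delete = true
instance (grid : List (List Int)) (delete : Option (Int × Int)) : Decidable (Pre_dfs grid delete) := by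
  unfold Pre_dfs; infer_instance
def pvWitness_dfs : List (List Int) × (Option (Int × Int)) := ([[1, 1], [1, 0]], none)
def Spec_dfs (grid : List (List Int)) (delete : Option (Int × Int)) (out : Bool) : Prop := out = dfs_alt grid delete
instance (grid : List (List Int)) (delete : Option (Int × Int)) (out : Bool) : Decidable (Spec_dfs grid delete out) := by unfold Spec_dfs; infer_instance

-- ===== CLAIM (what is proved, stated in full; the proofs are below) =====
def Claim_equal_dfs : Prop := ∀ (grid : List (List Int)) (delete : Option (Int × Int)), Dom_dfs grid delete → Pre_dfs grid delete → Spec_dfs grid delete (dfs grid delete)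

-- ===== LEMMAS AND PROOFS =====

-- loop measure for Source B's while-loop: 5*(number of 1-cells) + total pending work on the stack
def pvWeight (stack : List (Int × Int × Nat)) : Nat :=
  (stack.map (fun fr => 5 - min fr.2.2 4)).sum

-- the direction tables of the two Pythons agree componentwise
theorem pvDirs_split (k : Nat) :
    pvDirs.getD k (0, 0) = (pvDR.getD k 0, pvDC.getD k 0) := by
  match k with
  | 0 | 1 | 2 | 3 => rfl
  | k + 4 => simp [pvDirs, pvDR, pvDC, List.getD]

-- Source B's in-bounds test is the negation of A's out-of-bounds test
theorem pvInb_eq_not_oob (g : List (List Int)) (nr nc : Int) :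
    pvInb g nr nc = !pvOob g nr nc := by
  unfold pvInb pvOob
  rw [Bool.eq_iff_iff]
  simp

theorem pvOnes_set_lt (g : List (List Int)) (n : Nat) (row' : List Int) :
    n < g.length → row'.countP (fun x => x == 1) < (g.getD n []).countP (fun x => x == 1) →
    pvOnes (g.set n row') < pvOnes g := by
  induction g generalizing n with
  | nil => intro hn _; simp at hn
  | cons hd tl ih =>
      intro hn hlt
      cases n with
      | zero => simp [pvOnes] at hlt ⊢; omega
      | succ n' =>
          have := ih n' (by simpa using hn) (by simpa using hlt)
          simp [pvOnes, List.set] at this ⊢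
          omega

-- zeroing a cell that reads 1 strictly decreases the count of 1-cells
theorem pvOnes_set0_lt (g : List (List Int)) (r c : Int) (h : pvRead g r c = 1) :
    pvOnes (pvSet0 g r c) < pvOnes g := by
  unfold pvRead at h
  rcases e1 : PySem.List.pyGet? g r with _ | row
  · rw [e1] at h; simp at h
  rw [e1] at h
  replace h : (PySem.List.pyGet? row c).getD 0 = 1 := h
  rcases e2 : PySem.List.pyGet? row c with _ | x
  · rw [e2] at h; simp at h
  rw [e2] at h
  simp only [Option.getD_some] at h
  subst h
  -- normalise the two python indices through pyIdx?
  unfold PySem.List.pyGet? at e1 e2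
  obtain ⟨n, eI, hn, hgn⟩ : ∃ n, PySem.List.pyIdx? g.length r = some n ∧
      ∃ _ : n < g.length, g[n] = row := by
    cases eI : PySem.List.pyIdx? g.length r with
    | none => rw [eI] at e1; simp at e1
    | some n =>
        rw [eI] at e1
        refine ⟨n, rfl, ?_⟩
        exact List.getElem?_eq_some_iff.mp (by simpa using e1)
  obtain ⟨m, eJ, hm, hrm⟩ : ∃ m, PySem.List.pyIdx? row.length c = some m ∧
      ∃ _ : m < row.length, row[m] = 1 := by
    cases eJ : PySem.List.pyIdx? row.length c with
    | none => rw [eJ] at e2; simp at e2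
    | some m =>
        rw [eJ] at e2
        refine ⟨m, rfl, ?_⟩
        exact List.getElem?_eq_some_iff.mp (by simpa using e2)
  have hrow : PySem.List.pyGetD g r [] = row := by
    unfold PySem.List.pyGetD PySem.List.pyGet?
    rw [eI]
    simp [List.getElem?_eq_getElem hn, hgn]
  have hgetD : g.getD n [] = row := by
    simp [List.getD, List.getElem?_eq_getElem hn, hgn]
  unfold pvSet0 PySem.List.pySetD PySem.List.pySet?
  rw [hrow, eI, eJ]
  simp only [Option.map_some, Option.getD_some]
  have hcnt : (row.set m 0).countP (fun x => x == 1) < row.countP (fun x => x == 1) := by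
    have hp : (fun x : Int => x == 1) row[m] = true := by simp [hrm]
    have hpos : 0 < row.countP (fun x : Int => x == 1) :=
      List.countP_pos_iff.mpr ⟨row[m], List.getElem_mem hm, hp⟩
    have h1 : (if (fun x : Int => x == 1) row[m] = true then 1 else 0) = 1 := by simp [hrm]
    have h2 : (if (fun x : Int => x == 1) (0 : Int) = true then 1 else 0) = 0 := by simp
    rw [List.countP_set hm, h1, h2]
    omega
  exact pvOnes_set_lt g n (row.set m 0) hn (by rw [hgetD]; exact hcnt)

-- the flood removes ones, never adds them
theorem pvOnes_goA_le : ∀ (f : Nat) (g : List (List Int)) (r c : Int) (ds : List (Int × Int)),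
    pvOnes (pvGoA f g r c ds) ≤ pvOnes g := by
  intro f
  induction f with
  | zero => intro g r c ds; cases ds <;> simp [pvGoA]
  | succ f ih =>
      intro g r c ds
      cases ds with
      | nil => simp [pvGoA]
      | cons d ds =>
          obtain ⟨dr, dc⟩ := d
          rw [pvGoA]
          split
          · exact ih g r c ds
          · split
            · calc pvOnes (pvGoA f (pvGoA f (pvSet0 g (r+dr) (c+dc)) (r+dr) (c+dc) pvDirs) r c ds)
                    ≤ pvOnes (pvGoA f (pvSet0 g (r+dr) (c+dc)) (r+dr) (c+dc) pvDirs) := ih _ _ _ _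
                _ ≤ pvOnes (pvSet0 g (r+dr) (c+dc)) := ih _ _ _ _
                _ ≤ pvOnes g :=
                    le_of_lt (pvOnes_set0_lt g (r+dr) (c+dc) (by simpa using (by assumption : (pvRead g (r+dr) (c+dc) == 1) = true)))
            · exact ih g r c ds

theorem pvFrameGoB_nil (f : Nat) (g : List (List Int)) : pvFrameGoB f g [] = g := by
  cases f <;> rfl

-- FUEL IRRELEVANCE: any fuel strictly above the loop measure computes the same result
theorem pvFuelIrrel : ∀ (f1 : Nat) (g : List (List Int)) (s : List (Int × Int × Nat)) (f2 : Nat),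
    5 * pvOnes g + pvWeight s < f1 → 5 * pvOnes g + pvWeight s < f2 →
    pvFrameGoB f1 g s = pvFrameGoB f2 g s := by
  intro f1
  induction f1 with
  | zero => intro g s f2 h1 _; omega
  | succ f1 ih =>
      intro g s f2 h1 h2
      cases s with
      | nil => rw [pvFrameGoB_nil, pvFrameGoB_nil]
      | cons fr rest =>
          obtain ⟨r, c, k⟩ := fr
          obtain ⟨f2, rfl⟩ : ∃ f2', f2 = f2' + 1 := ⟨f2 - 1, by omega⟩
          have hw : 1 ≤ 5 - min k 4 := by omega
          rw [pvFrameGoB, pvFrameGoB]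
          by_cases hk : 4 ≤ k
          · rw [if_pos hk, if_pos hk]
            exact ih g rest f2 (by simp only [pvWeight, List.map_cons, List.sum_cons] at h1 ⊢; omega) (by simp only [pvWeight, List.map_cons, List.sum_cons] at h2 ⊢; omega)
          · rw [if_neg hk, if_neg hk]
            have hw1 : 5 - min (k + 1) 4 < 5 - min k 4 := by omega
            by_cases hc : (pvInb g (r + pvDR.getD k 0) (c + pvDC.getD k 0) &&
                (pvRead g (r + pvDR.getD k 0) (c + pvDC.getD k 0) == 1)) = true
            · rw [if_pos hc, if_pos hc]
              have hlt := pvOnes_set0_lt g (r + pvDR.getD k 0) (c + pvDC.getD k 0)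
                (by simpa using (Bool.and_elim_right hc))
              exact ih _ _ f2 (by simp only [pvWeight, List.map_cons, List.sum_cons] at h1 ⊢; omega) (by simp only [pvWeight, List.map_cons, List.sum_cons] at h2 ⊢; omega)
            · rw [if_neg hc, if_neg hc]
              exact ih g _ f2 (by simp only [pvWeight, List.map_cons, List.sum_cons] at h1 ⊢; omega) (by simp only [pvWeight, List.map_cons, List.sum_cons] at h2 ⊢; omega)

theorem pvDrop_eq (k : Nat) (hk : k < 4) (dr dc : Int) (hdd : pvDirs.getD k (0, 0) = (dr, dc)) :
    pvDirs.drop k = (dr, dc) :: pvDirs.drop (k + 1) := by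
  interval_cases k <;> simp_all [pvDirs]

-- MAIN LEMMA: processing the top frame (r, c, k) of the stack is exactly running A's
-- recursive dfs2 on the remaining directions pvDirs.drop k (given enough fuel on both sides).
theorem pvMain : ∀ (f : Nat) (g : List (List Int)) (r c : Int) (k : Nat) (rest : List (Int × Int × Nat)) (fb : Nat),
    5 * pvOnes g + (4 - k) + 1 ≤ f →
    5 * pvOnes g + pvWeight ((r, c, k) :: rest) < fb →
    pvFrameGoB fb g ((r, c, k) :: rest) = pvFrameGoB fb (pvGoA f g r c (pvDirs.drop k)) rest := by
  intro f
  induction f with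
  | zero => intro g r c k rest fb h _; omega
  | succ f ih =>
      intro g r c k rest fb h hfb
      have hwk : 1 ≤ 5 - min k 4 := by omega
      have hwr : pvWeight ((r, c, k) :: rest) = (5 - min k 4) + pvWeight rest := by
        simp [pvWeight]
      obtain ⟨fb, rfl⟩ : ∃ fb', fb = fb' + 1 := ⟨fb - 1, by omega⟩
      by_cases hk : 4 ≤ k
      · have hdrop : pvDirs.drop k = [] := List.drop_eq_nil_of_le (by simp [pvDirs]; omega)
        rw [pvFrameGoB, if_pos hk, hdrop, pvGoA]
        exact pvFuelIrrel fb g rest (fb + 1) (by omega) (by omega)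
      · have hk4 : k < 4 := by omega
        rcases hdd : pvDirs.getD k (0, 0) with ⟨dr, dc⟩
        have hdrop := pvDrop_eq k hk4 dr dc hdd
        have hsplit := ((pvDirs_split k).symm.trans hdd)
        injection hsplit with hdr hdc
        rw [pvFrameGoB, if_neg hk]
        simp only [hdr, hdc, hdrop]
        rw [pvGoA]
        have hwk1 : pvWeight ((r, c, k + 1) :: rest) < pvWeight ((r, c, k) :: rest) := by
          simp [pvWeight]; omega
        by_cases ho : pvOob g (r + dr) (c + dc) = true
        · have hcB : (pvInb g (r + dr) (c + dc) && (pvRead g (r + dr) (c + dc) == 1)) = false := by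
            rw [pvInb_eq_not_oob, ho]; simp
          rw [if_neg (by rw [hcB]; exact Bool.false_ne_true), if_pos ho]
          rw [ih g r c (k + 1) rest fb (by omega) (by omega)]
          exact pvFuelIrrel fb _ rest (fb + 1)
            (by have := pvOnes_goA_le f g r c (pvDirs.drop (k + 1)); omega)
            (by have := pvOnes_goA_le f g r c (pvDirs.drop (k + 1)); omega)
        · replace ho : pvOob g (r + dr) (c + dc) = false := by
            cases hob : pvOob g (r + dr) (c + dc) <;> simp_all
          have hoA : ¬ pvOob g (r + dr) (c + dc) = true := by
            rw [ho]; exact Bool.false_ne_true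
          have hcB : (pvInb g (r + dr) (c + dc) && (pvRead g (r + dr) (c + dc) == 1))
              = (pvRead g (r + dr) (c + dc) == 1) := by
            rw [pvInb_eq_not_oob, ho]; simp
          rw [if_neg hoA, hcB]
          by_cases h1 : (pvRead g (r + dr) (c + dc) == 1) = true
          · rw [if_pos h1, if_pos h1]
            have hones := pvOnes_set0_lt g (r + dr) (c + dc) (by simpa using h1)
            rw [ih (pvSet0 g (r + dr) (c + dc)) (r + dr) (c + dc) 0
                  ((r, c, k + 1) :: rest) fb (by omega)
                  (by simp only [pvWeight, List.map_cons, List.sum_cons] at hfb ⊢; omega)]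
            rw [List.drop_zero]
            have hle := pvOnes_goA_le f (pvSet0 g (r + dr) (c + dc)) (r + dr) (c + dc) pvDirs
            rw [ih (pvGoA f (pvSet0 g (r + dr) (c + dc)) (r + dr) (c + dc) pvDirs) r c (k + 1) rest fb (by omega) (by simp only [pvWeight, List.map_cons, List.sum_cons] at hfb ⊢; omega)]
            have hle2 := pvOnes_goA_le f (pvGoA f (pvSet0 g (r + dr) (c + dc)) (r + dr) (c + dc) pvDirs) r c (pvDirs.drop (k + 1))
            exact pvFuelIrrel fb (pvGoA f (pvGoA f (pvSet0 g (r + dr) (c + dc)) (r + dr) (c + dc) pvDirs) r c (pvDirs.drop (k + 1))) rest (fb + 1) (by omega) (by omega)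
          · rw [if_neg h1, if_neg h1]
            rw [ih g r c (k + 1) rest fb (by omega) (by omega)]
            exact pvFuelIrrel fb (pvGoA f g r c (pvDirs.drop (k + 1))) rest (fb + 1)
              (by have := pvOnes_goA_le f g r c (pvDirs.drop (k + 1)); omega)
              (by have := pvOnes_goA_le f g r c (pvDirs.drop (k + 1)); omega)

-- Source B's whole flood from a seed computes A's dfs2
theorem pvFloodEq (g : List (List Int)) (r c : Int) :
    pvFrameGoB (5 * pvOnes g + 6) g [(r, c, 0)] = pvDfs2A g r c := by
  have hmain := pvMain (5 * pvOnes g + 10) g r c 0 [] (5 * pvOnes g + 6)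
    (by omega) (by simp only [pvWeight, List.map_cons, List.sum_cons, List.map_nil, List.sum_nil]; omega)
  simpa [pvFrameGoB_nil, pvDfs2A] using hmain

-- the per-cell step both scans perform
def pvStep (s : List (List Int) × Int) (p : Int × Int) : List (List Int) × Int :=
  if pvRead s.1 p.1 p.2 ≠ 0 then (pvDfs2A s.1 p.1 p.2, s.2 + 1) else s

-- Source B's scan is a fold of pvStep over the cell list
theorem pvScanB_eq_foldl : ∀ (cells : List (Int × Int)) (g : List (List Int)) (o : Int),
    pvScanB cells g o = cells.foldl pvStep (g, o) := by
  intro cells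
  induction cells with
  | nil => intro g o; rfl
  | cons p rest ih =>
      intro g o
      rw [pvScanB, List.foldl_cons]
      by_cases hp : pvRead g p.1 p.2 ≠ 0
      · rw [if_pos hp, ih, pvFloodEq]
        simp [pvStep, hp]
      · rw [if_neg hp, ih]
        simp [pvStep, hp]

-- SHAPE PRESERVATION: the floods change values only, never row lengths
theorem pvIdx_lt (len : Nat) (i : Int) (n : Nat)
    (h : PySem.List.pyIdx? len i = some n) : n < len := by
  unfold PySem.List.pyIdx? at h
  split_ifs at h with h1 h2 h3
  · simp only [Option.some.injEq] at h; omega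
  · simp only [Option.some.injEq] at h; omega

theorem pvShape_set0 (g : List (List Int)) (r c : Int) :
    (pvSet0 g r c).map List.length = g.map List.length := by
  unfold pvSet0 PySem.List.pySetD PySem.List.pySet?
  cases eI : PySem.List.pyIdx? g.length r with
  | none => simp
  | some n =>
      have hn : n < g.length := pvIdx_lt _ _ _ eI
      simp only [Option.map_some, Option.getD_some]
      rw [List.map_set]
      have hlen : ((Option.map (fun k => (PySem.List.pyGetD g r []).set k 0)
          (PySem.List.pyIdx? (PySem.List.pyGetD g r []).length c)).getD
          (PySem.List.pyGetD g r [])).length = (PySem.List.pyGetD g r []).length := by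
        cases PySem.List.pyIdx? (PySem.List.pyGetD g r []).length c <;> simp
      have hrow : PySem.List.pyGetD g r [] = g[n] := by
        unfold PySem.List.pyGetD PySem.List.pyGet?
        rw [eI]
        simp [List.getElem?_eq_getElem hn]
      rw [hlen, hrow]
      apply List.ext_getElem (by simp)
      intro k hk1 hk2
      rw [List.getElem_set]
      split
      · next heq => subst heq; simp
      · rfl

theorem pvShape_goA : ∀ (f : Nat) (g : List (List Int)) (r c : Int) (ds : List (Int × Int)),
    (pvGoA f g r c ds).map List.length = g.map List.length := by
  intro f
  induction f with
  | zero => intro g r c ds; cases ds <;> simp [pvGoA]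
  | succ f ih =>
      intro g r c ds
      cases ds with
      | nil => simp [pvGoA]
      | cons d ds =>
          obtain ⟨dr, dc⟩ := d
          rw [pvGoA]
          split
          · exact ih g r c ds
          · split
            · rw [ih, ih, pvShape_set0]
            · exact ih g r c ds

theorem pvShape_step (s : List (List Int) × Int) (p : Int × Int) :
    (pvStep s p).1.map List.length = s.1.map List.length := by
  unfold pvStep
  split
  · exact pvShape_goA _ _ _ _ _
  · rfl

theorem pvShape_foldl : ∀ (cells : List (Int × Int)) (s : List (List Int) × Int),
    (cells.foldl pvStep s).1.map List.length = s.1.map List.length := by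
  intro cells
  induction cells with
  | nil => intro s; rfl
  | cons p rest ih => intro s; rw [List.foldl_cons, ih, pvShape_step]

-- same row-length profile ⇒ same pyGetD row lengths everywhere
theorem pvGetD_len_congr (xs ys : List (List Int)) (h : xs.map List.length = ys.map List.length)
    (i : Int) : (PySem.List.pyGetD xs i []).length = (PySem.List.pyGetD ys i []).length := by
  have hlen : xs.length = ys.length := by
    have := congrArg List.length h; simpa using this
  unfold PySem.List.pyGetD PySem.List.pyGet?
  rw [← hlen]
  cases eI : PySem.List.pyIdx? xs.length i with
  | none => simp
  | some n =>
      have hmap : xs[n]?.map List.length = ys[n]?.map List.length := by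
        rw [← List.getElem?_map, ← List.getElem?_map, h]
      cases ex : xs[n]? with
      | none =>
          cases ey : ys[n]? with
          | none => simp [ex, ey]
          | some row => rw [ex, ey] at hmap; simp at hmap
      | some row =>
          cases ey : ys[n]? with
          | none => rw [ex, ey] at hmap; simp at hmap
          | some row2 =>
              rw [ex, ey] at hmap
              simp only [Option.map_some, Option.some.injEq] at hmap
              simp [ex, ey, hmap]

-- the cell list built from enumerate, as a flatMap over the row index range
theorem pvCellsB_eq (g : List (List Int)) :
    pvCellsB g = (PySem.List.pyRange 0 g.length 1).flatMap
      (fun i => (PySem.List.pyRange 0 (PySem.List.pyGetD g i []).length 1).map (fun j => (i, j))) := by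
  unfold pvCellsB
  rw [PySem.List.enumerate_eq_map_pyRange (d := []), List.flatMap_map]
  simp

-- A's nested loops equal a fold of pvStep over the flattened cell list (up to row n)
theorem pvOuterEq : ∀ (n : Nat) (g0 : List (List Int)) (s : List (List Int) × Int),
    s.1.map List.length = g0.map List.length →
    (PySem.List.pyRange 0 (n : Int) 1).foldl (fun (s : List (List Int) × Int) i =>
        (PySem.List.pyRange 0 (PySem.List.pyGetD s.1 i []).length 1).foldl
          (fun (s2 : List (List Int) × Int) j =>
            if pvRead s2.1 i j ≠ 0 then (pvDfs2A s2.1 i j, s2.2 + 1) else s2) s) s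
      = ((PySem.List.pyRange 0 (n : Int) 1).flatMap
          (fun i => (PySem.List.pyRange 0 (PySem.List.pyGetD g0 i []).length 1).map (fun j => (i, j)))).foldl
          pvStep s := by
  intro n
  induction n with
  | zero => intro g0 s _; simp [PySem.List.pyRange_one_eq_nil]
  | succ n ih =>
      intro g0 s hs
      have hsplit : PySem.List.pyRange 0 ((n + 1 : Nat) : Int) 1
          = PySem.List.pyRange 0 (n : Int) 1 ++ [(n : Int)] := by
        have : ((n + 1 : Nat) : Int) = (n : Int) + 1 := by push_cast; ring
        rw [this, PySem.List.pyRange_one_succ_right (by positivity)]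
      rw [hsplit, List.foldl_append, List.flatMap_append, List.foldl_append, ih g0 s hs]
      simp only [List.flatMap_cons, List.flatMap_nil, List.append_nil, List.foldl_cons]
      set t := ((PySem.List.pyRange 0 (n : Int) 1).flatMap
          (fun i => (PySem.List.pyRange 0 (PySem.List.pyGetD g0 i []).length 1).map (fun j => (i, j)))).foldl pvStep s with ht
      have hshape : t.1.map List.length = g0.map List.length := by
        rw [ht, pvShape_foldl, hs]
      have hlen : (PySem.List.pyGetD t.1 (n : Int) []).length
          = (PySem.List.pyGetD g0 (n : Int) []).length := pvGetD_len_congr _ _ hshape _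
      rw [hlen, List.foldl_map]
      rfl

-- ===== VERDICT (by name: the statement is the Claim_ definition above) =====
theorem dfs_spec : Claim_equal_dfs := by
  intro grid delete _hdom _hpre
  unfold Spec_dfs
  simp only [dfs, dfs_alt]
  rw [pvScanB_eq_foldl, pvCellsB_eq, pvOuterEq _ _ _ rfl]
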